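-- pv_equiv track=rewrite | github.com/RyanSamor/Projetos | Code_challenge/05-Filtragem_de_Visuais.py | filtrar_visuais
-- ===== SOURCE A (Python) =====
-- def filtrar_visuais(lista_visuais):
--     # Converter a string de entrada em uma lista
--     visuais = lista_visuais.split(", ")
--     visuais_final = []
--
--     # TODO: Normalize e remova duplicatas usando um conjunto
--     for visual in visuais:
--         visual = visual.title()
--         visuais_final.append(visual)
--
--     # TODO: Converta o conjunto de volta para uma lista ordenada:
--     lista_final = list(set(visuais_final))
--     lista_final = sorted(lista_final)
--
--     # Unir a lista em uma string, separada por vírgulas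
--     return ", ".join(lista_final)
-- ===== SOURCE B (Python) =====
-- def filtrar_visuais(lista_visuais):
--     # Title-case each piece, sort, then drop adjacent duplicates in one scan.
--     itens = sorted(v.title() for v in lista_visuais.split(", "))
--     resultado = []
--     anterior = None
--     for item in itens:
--         if item != anterior:
--             resultado.append(item)
--             anterior = item
--     return ", ".join(resultado)
-- ===== Notes on version B (the rewrite author's own statement) =====
-- stated objective: alternative
-- what changed: B drops the set entirely: it title-cases the split pieces, sorts them first, and dedupes by a single adjacent-comparison scan over the sorted list, whereas A dedupes via a hash set and then sorts the distinct elements.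
import Mathlib
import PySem

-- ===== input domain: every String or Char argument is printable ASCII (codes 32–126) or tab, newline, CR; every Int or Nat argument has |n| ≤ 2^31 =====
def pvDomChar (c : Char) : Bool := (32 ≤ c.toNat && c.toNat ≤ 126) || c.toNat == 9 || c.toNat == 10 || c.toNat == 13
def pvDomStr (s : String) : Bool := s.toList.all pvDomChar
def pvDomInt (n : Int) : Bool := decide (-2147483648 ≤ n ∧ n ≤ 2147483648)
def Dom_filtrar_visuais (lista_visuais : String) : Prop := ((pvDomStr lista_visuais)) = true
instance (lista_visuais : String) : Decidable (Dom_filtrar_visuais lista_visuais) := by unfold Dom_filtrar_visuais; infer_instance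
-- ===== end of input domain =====

-- B replaces A's set-then-sort dedup by sort-then-adjacent-scan (no set at all); objective: alternative.

-- ===== PORT A =====
-- shared hand port of str.title() (exact on the ASCII domain: cased = ASCII letter);
-- the Bool argument is "previous character was cased"
def pyTitleChars : Bool → List Char → List Char
  | _, [] => []
  | prev, c :: t =>
    if PySem.Chars.isalpha c then
      (if prev then PySem.Chars.lowerChar c else PySem.Chars.upperChar c) :: pyTitleChars true t
    else
      c :: pyTitleChars false t

def pyTitle (s : String) : String := String.ofList (pyTitleChars false s.toList)

-- sep ", " is non-empty, so PySem.Str.split? is always `some`; .getD [] just unwraps it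
def filtrar_visuais (lista_visuais : String) : String :=
  let visuais := (PySem.Str.split? lista_visuais ", ").getD []
  let visuais_final := visuais.foldl (fun acc visual => acc ++ [pyTitle visual]) []
  let lista_final := PySem.Set.ofList visuais_final
  let lista_final := PySem.List.sorted lista_final (fun x => x) false
  PySem.Str.join ", " lista_final

-- ===== PORT B =====
def filtrar_visuais_alt (lista_visuais : String) : String :=
  let itens := PySem.List.sorted (((PySem.Str.split? lista_visuais ", ").getD []).map pyTitle) (fun x => x) false
  let st := itens.foldl
    (fun (st : List String × Option String) item =>
      if some item ≠ st.2 then (st.1 ++ [item], some item) else st)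
    ([], none)
  PySem.Str.join ", " st.1

-- ===== PRECONDITION & SPEC =====
def Spec_filtrar_visuais (lista_visuais : String) (out : String) : Prop := out = filtrar_visuais_alt lista_visuais
instance (lista_visuais : String) (out : String) : Decidable (Spec_filtrar_visuais lista_visuais out) := by unfold Spec_filtrar_visuais; infer_instance

-- ===== CLAIM (what is proved, stated in full; the proofs are below) =====
def Claim_equal_filtrar_visuais : Prop := ∀ (lista_visuais : String), Dom_filtrar_visuais lista_visuais → Spec_filtrar_visuais lista_visuais (filtrar_visuais lista_visuais)

-- ===== LEMMAS AND PROOFS =====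

-- the adjacent-dedup that B's loop computes, as a structural recursion over the items
def gDedup : Option String → List String → List String
  | _, [] => []
  | ant, x :: t => if some x ≠ ant then x :: gDedup (some x) t else gDedup ant t

theorem gDedup_cons_self (a : String) (t : List String) :
    gDedup (some a) (a :: t) = gDedup (some a) t := by
  simp [gDedup]

theorem gDedup_cons_ne (x : String) (ant : Option String) (t : List String)
    (h : some x ≠ ant) : gDedup ant (x :: t) = x :: gDedup (some x) t := by
  simp [gDedup, h]

theorem foldlA_eq_map (l : List String) (acc : List String) :
    l.foldl (fun acc v => acc ++ [pyTitle v]) acc = acc ++ l.map pyTitle := by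
  induction l generalizing acc with
  | nil => simp
  | cons x t ih => simp [List.foldl, ih]

theorem bLoop_eq_gDedup (l : List String) (res : List String) (ant : Option String) :
    (l.foldl
      (fun (st : List String × Option String) item =>
        if some item ≠ st.2 then (st.1 ++ [item], some item) else st)
      (res, ant)).1 = res ++ gDedup ant l := by
  induction l generalizing res ant with
  | nil => simp [gDedup]
  | cons x t ih =>
    simp only [List.foldl]
    by_cases h : some x ≠ ant
    · rw [if_pos h, ih, gDedup_cons_ne x ant t h]; simp
    · rw [if_neg h, ih]
      have : some x = ant := not_ne_iff.mp h
      subst this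
      rw [gDedup_cons_self]

theorem gDedup_spec (l : List String) (a : String)
    (hp : l.Pairwise (· ≤ ·)) (ha : ∀ y ∈ l, a ≤ y) :
    (gDedup (some a) l).Pairwise (· < ·) ∧
      (∀ x, x ∈ gDedup (some a) l ↔ x ∈ l ∧ x ≠ a) := by
  induction l generalizing a with
  | nil => simp [gDedup]
  | cons x t ih =>
    rcases List.pairwise_cons.mp hp with ⟨hx, hpt⟩
    by_cases hxa : x = a
    · subst hxa
      have ihx := ih x hpt hx
      rw [gDedup_cons_self]
      refine ⟨ihx.1, fun y => ?_⟩
      rw [ihx.2]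
      constructor
      · rintro ⟨hy, hne⟩; exact ⟨List.mem_cons_of_mem _ hy, hne⟩
      · rintro ⟨hy, hne⟩
        rcases List.mem_cons.mp hy with rfl | hy
        · exact absurd rfl hne
        · exact ⟨hy, hne⟩
    · have hax : a < x := lt_of_le_of_ne (ha x List.mem_cons_self) (fun h => hxa h.symm)
      have ihx := ih x hpt hx
      rw [gDedup_cons_ne x (some a) t (fun h => hxa (Option.some.inj h))]
      constructor
      · refine List.pairwise_cons.mpr ⟨fun y hy => ?_, ihx.1⟩
        rcases (ihx.2 y).mp hy with ⟨hyt, hyx⟩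
        exact lt_of_le_of_ne (hx y hyt) (fun h => hyx h.symm)
      · intro y
        rw [List.mem_cons, List.mem_cons, ihx.2]
        constructor
        · rintro (rfl | ⟨hyt, _⟩)
          · exact ⟨Or.inl rfl, hxa⟩
          · refine ⟨Or.inr hyt, ?_⟩
            rename_i hyx
            intro h; subst h
            exact absurd (hx y hyt) (not_le_of_gt hax)
        · rintro ⟨rfl | hyt, hya⟩
          · exact Or.inl rfl
          · by_cases hyx : y = x
            · exact Or.inl hyx
            · exact Or.inr ⟨hyt, hyx⟩

theorem gDedup_none_spec (l : List String) (hp : l.Pairwise (· ≤ ·)) :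
    (gDedup none l).Pairwise (· < ·) ∧ (∀ x, x ∈ gDedup none l ↔ x ∈ l) := by
  cases l with
  | nil => simp [gDedup]
  | cons x t =>
    rcases List.pairwise_cons.mp hp with ⟨hx, hpt⟩
    have hs := gDedup_spec t x hpt hx
    rw [gDedup_cons_ne x none t (by simp)]
    constructor
    · refine List.pairwise_cons.mpr ⟨fun y hy => ?_, hs.1⟩
      rcases (hs.2 y).mp hy with ⟨hyt, hyx⟩
      exact lt_of_le_of_ne (hx y hyt) (fun h => hyx h.symm)
    · intro y
      rw [List.mem_cons, List.mem_cons, hs.2]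
      constructor
      · rintro (rfl | ⟨hyt, _⟩)
        · exact Or.inl rfl
        · exact Or.inr hyt
      · rintro (rfl | hyt)
        · exact Or.inl rfl
        · by_cases hyx : y = x
          · exact Or.inl hyx
          · exact Or.inr ⟨hyt, hyx⟩

theorem sorted_set_eq_gDedup (L : List String) :
    PySem.List.sorted (PySem.Set.ofList L) (fun x => x) false =
      gDedup none (PySem.List.sorted L (fun x => x) false) := by
  have hpS : (PySem.List.sorted L (fun x => x) false).Pairwise (· ≤ ·) :=
    PySem.List.sorted_pairwise L (fun x => x)
  have hg := gDedup_none_spec _ hpS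
  refine PySem.List.sorted_eq_of_perm_of_pairwise_lt _ _ (fun x => x) ?_ hg.1
  have hnd : (gDedup none (PySem.List.sorted L (fun x => x) false)).Nodup :=
    hg.1.imp (fun h => ne_of_lt h)
  rw [List.perm_ext_iff_of_nodup hnd (PySem.Set.nodup_ofList L)]
  intro a
  rw [hg.2, PySem.List.mem_sorted, PySem.Set.mem_ofList]

-- ===== VERDICT (by name: the statement is the Claim_ definition above) =====
theorem filtrar_visuais_spec : Claim_equal_filtrar_visuais := by
  intro s _
  unfold Spec_filtrar_visuais filtrar_visuais filtrar_visuais_alt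
  simp only [foldlA_eq_map, List.nil_append, bLoop_eq_gDedup, sorted_set_eq_gDedup]
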